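-- pv_equiv track=rewrite | github.com/Random0617/Project02_LogicalAgent | main.py | Breeze
-- ===== SOURCE A (Python) =====
-- def Breeze(matrix):
--     # Given a two-dimensional matrix of rooms, return a two-dimensional boolean list
--     # of whether the room has a Breeze (is directly adjacent to a pit square)
--     ARRAY_SIZE = len(matrix)
--     resulting_array = [[0 for i in range(ARRAY_SIZE)] for j in range(ARRAY_SIZE)]
--     for i in range(ARRAY_SIZE):
--         for k in range(ARRAY_SIZE):
--             if ((i - 1 >= 0 and matrix[i - 1][k] == 'P')
--                     or (i + 1 < ARRAY_SIZE and matrix[i + 1][k] == 'P')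
--                     or (k - 1 >= 0 and matrix[i][k - 1] == 'P')
--                     or (k + 1 < ARRAY_SIZE and matrix[i][k + 1] == 'P')):
--                 resulting_array[i][k] = resulting_array[i][k] + 1
--     return resulting_array
-- ===== SOURCE B (Python) =====
-- def Breeze(matrix):
--     # Scatter from each pit to its in-bounds orthogonal neighbors (assign 1, never increment).
--     n = len(matrix)
--     result = [[0] * n for _ in range(n)]
--     for i in range(n):
--         for k in range(n):
--             if matrix[i][k] == 'P':
--                 for r, c in ((i - 1, k), (i + 1, k), (i, k - 1), (i, k + 1)):
--                     if 0 <= r < n and 0 <= c < n: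
--                         result[r][c] = 1
--     return result
-- ===== Notes on version B (the rewrite author's own statement) =====
-- stated objective: alternative
-- what changed: B scatters: it scans for pit cells and assigns 1 to each in-bounds orthogonal neighbor of a pit, instead of A's gather that evaluates a four-way neighbor test at every cell; the per-cell work drops to one comparison unless the cell is a pit.
-- outside the precondition, e.g. on Breeze([[]]): A returns [[0]], B raises IndexError
import Mathlib
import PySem

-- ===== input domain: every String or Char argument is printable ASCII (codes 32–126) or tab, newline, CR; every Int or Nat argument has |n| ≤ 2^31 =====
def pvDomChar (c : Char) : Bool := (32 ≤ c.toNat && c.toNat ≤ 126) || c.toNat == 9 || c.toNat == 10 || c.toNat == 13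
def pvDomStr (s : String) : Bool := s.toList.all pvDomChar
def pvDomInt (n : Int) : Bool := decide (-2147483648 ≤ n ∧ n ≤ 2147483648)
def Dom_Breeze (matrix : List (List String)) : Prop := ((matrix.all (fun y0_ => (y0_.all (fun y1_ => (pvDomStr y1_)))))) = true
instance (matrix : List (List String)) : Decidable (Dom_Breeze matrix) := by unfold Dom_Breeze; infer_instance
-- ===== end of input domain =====

-- B replaces A's gather (test all four neighbors of every cell, increment) by a scatter
-- (for each pit, assign 1 to its in-bounds orthogonal neighbors); same O(n^2) cost, alternative algorithm.


-- ===== PORT A =====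
-- matrix[i][k] as a total read (Pre_ keeps the guarded accesses in range, where this equals Python's)
def pvCell (m : List (List String)) (i k : Int) : String :=
  PySem.List.pyGetD (PySem.List.pyGetD m i []) k ""

def Breeze (matrix : List (List String)) : List (List Int) :=
  let n : Int := PySem.List.len matrix
  let init : List (List Int) :=
    (PySem.List.pyRange 0 n 1).map (fun _ => (PySem.List.pyRange 0 n 1).map (fun _ => (0 : Int)))
  (PySem.List.pyRange 0 n 1).foldl (fun res i =>
    (PySem.List.pyRange 0 n 1).foldl (fun res k =>
      if (0 ≤ i - 1 ∧ pvCell matrix (i - 1) k = "P")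
          ∨ (i + 1 < n ∧ pvCell matrix (i + 1) k = "P")
          ∨ (0 ≤ k - 1 ∧ pvCell matrix i (k - 1) = "P")
          ∨ (k + 1 < n ∧ pvCell matrix i (k + 1) = "P") then
        PySem.List.pySetD res i
          (PySem.List.pySetD (PySem.List.pyGetD res i []) k
            (PySem.List.pyGetD (PySem.List.pyGetD res i []) k 0 + 1))
      else res) res) init

-- ===== PORT B =====
-- result[r][c] = 1 when (r,c) is in bounds (the body of B's innermost loop)
def pvBump (n : Int) (res : List (List Int)) (rc : Int × Int) : List (List Int) :=
  if 0 ≤ rc.1 ∧ rc.1 < n ∧ 0 ≤ rc.2 ∧ rc.2 < n then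
    PySem.List.pySetD res rc.1 (PySem.List.pySetD (PySem.List.pyGetD res rc.1 []) rc.2 1)
  else res

def Breeze_alt (matrix : List (List String)) : List (List Int) :=
  let n : Int := PySem.List.len matrix
  let init : List (List Int) :=
    (PySem.List.pyRange 0 n 1).map (fun _ => List.replicate n.toNat (0 : Int))
  (PySem.List.pyRange 0 n 1).foldl (fun res i =>
    (PySem.List.pyRange 0 n 1).foldl (fun res k =>
      if pvCell matrix i k = "P" then
        [(i - 1, k), (i + 1, k), (i, k - 1), (i, k + 1)].foldl (pvBump n) res
      else res) res) init

-- ===== PRECONDITION & SPEC =====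
-- Pre_ excludes ragged matrices (some row shorter than n = len(matrix)): there the Python programs
-- index out of range — A's or-short-circuit sometimes still returns a value but usually raises
-- IndexError, and B always raises IndexError there.
def Pre_Breeze (matrix : List (List String)) : Prop :=
  ∀ row ∈ matrix, matrix.length ≤ row.length
instance (matrix : List (List String)) : Decidable (Pre_Breeze matrix) := by
  unfold Pre_Breeze; infer_instance

def pvWitness_Breeze : List (List String) := [["P", "."], [".", "."]]

def Spec_Breeze (matrix : List (List String)) (out : List (List Int)) : Prop := out = Breeze_alt matrix
instance (matrix : List (List String)) (out : List (List Int)) : Decidable (Spec_Breeze matrix out) := by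
  unfold Spec_Breeze; infer_instance

-- ===== CLAIM (what is proved, stated in full; the proofs are below) =====
def Claim_equal_Breeze : Prop :=
  ∀ (matrix : List (List String)), Dom_Breeze matrix → Pre_Breeze matrix →
    Spec_Breeze matrix (Breeze matrix)

-- ===== LEMMAS AND PROOFS =====

-- entry (r,c) of the grid, and the grid shape invariant
def gE (res : List (List Int)) (r c : Nat) : Int := (res.getD r []).getD c 0

def Shp (N : Nat) (res : List (List Int)) : Prop :=
  res.length = N ∧ ∀ row ∈ res, row.length = N

-- the iteration sequence of both double loops
def pairs (N : Nat) : List (Nat × Nat) := (List.range N) ×ˢ (List.range N)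

-- A's trigger condition and B's "pit p scatters onto (r,c)" condition, as Bools
def cA (m : List (List String)) (N : Nat) (r c : Nat) : Bool :=
  decide ((0 ≤ (r : Int) - 1 ∧ pvCell m ((r : Int) - 1) c = "P")
    ∨ ((r : Int) + 1 < (N : Int) ∧ pvCell m ((r : Int) + 1) c = "P")
    ∨ (0 ≤ (c : Int) - 1 ∧ pvCell m r ((c : Int) - 1) = "P")
    ∨ ((c : Int) + 1 < (N : Int) ∧ pvCell m r ((c : Int) + 1) = "P"))

def nb (i k r c : Nat) : Bool :=
  decide (((i : Int) - 1 = r ∧ (k : Int) = c) ∨ ((i : Int) + 1 = r ∧ (k : Int) = c)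
    ∨ ((i : Int) = r ∧ (k : Int) - 1 = c) ∨ ((i : Int) = r ∧ (k : Int) + 1 = c))

-- the two loop bodies, on Nat coordinates
def stepA (m : List (List String)) (N : Nat) (res : List (List Int)) (p : Nat × Nat) :
    List (List Int) :=
  if cA m N p.1 p.2 then
    res.set p.1 ((res.getD p.1 []).set p.2 ((res.getD p.1 []).getD p.2 0 + 1))
  else res

def stepB (m : List (List String)) (N : Nat) (res : List (List Int)) (p : Nat × Nat) :
    List (List Int) :=
  if pvCell m p.1 p.2 = "P" then
    [((p.1 : Int) - 1, (p.2 : Int)), ((p.1 : Int) + 1, (p.2 : Int)),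
     ((p.1 : Int), (p.2 : Int) - 1), ((p.1 : Int), (p.2 : Int) + 1)].foldl (pvBump (N : Int)) res
  else res

lemma mem_pairs {N : Nat} {p : Nat × Nat} : p ∈ pairs N ↔ p.1 < N ∧ p.2 < N := by
  obtain ⟨a, b⟩ := p
  simp [pairs, List.mem_product]

lemma nodup_pairs (N : Nat) : (pairs N).Nodup :=
  List.Nodup.product List.nodup_range List.nodup_range

lemma getD_mem {res : List (List Int)} {i : Nat} (h : i < res.length) :
    res.getD i [] ∈ res := by
  rw [List.getD_eq_getElem _ _ h]; exact List.getElem_mem h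

lemma shp_set {N : Nat} {res : List (List Int)} (h : Shp N res) {i : Nat} (k : Nat) (v : Int)
    (hi : i < N) : Shp N (res.set i ((res.getD i []).set k v)) := by
  obtain ⟨hl, hrow⟩ := h
  refine ⟨by simp [hl], ?_⟩
  intro row hr
  rcases List.mem_or_eq_of_mem_set hr with h1 | h1
  · exact hrow _ h1
  · subst h1
    rw [List.length_set]
    exact hrow _ (getD_mem (by omega))

lemma gE_set {N : Nat} {res : List (List Int)} (h : Shp N res) {i k r c : Nat}
    (hi : i < N) (_hk : k < N) (hr : r < N) (hc : c < N) (v : Int) :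
    gE (res.set i ((res.getD i []).set k v)) r c = if r = i ∧ c = k then v else gE res r c := by
  obtain ⟨hl, hrow⟩ := h
  have hrowlen : (res.getD i []).length = N := hrow _ (getD_mem (by omega))
  have h1 : r < (res.set i ((res.getD i []).set k v)).length := by
    rw [List.length_set]; omega
  unfold gE
  rw [List.getD_eq_getElem _ _ h1, List.getElem_set]
  by_cases hir : i = r
  · subst hir
    rw [if_pos rfl]
    have hc1 : c < ((res.getD i []).set k v).length := by rw [List.length_set]; omega
    rw [List.getD_eq_getElem _ _ hc1, List.getElem_set]
    by_cases hkc : k = c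
    · subst hkc
      rw [if_pos rfl, if_pos ⟨rfl, rfl⟩]
    · rw [if_neg hkc, if_neg (by tauto)]
      exact (List.getD_eq_getElem _ _ (by omega)).symm
  · rw [if_neg hir, if_neg (by tauto)]
    exact (congrArg (fun row => row.getD c 0) (List.getD_eq_getElem res [] (show r < res.length by omega))).symm


lemma entryA (m : List (List String)) (N : Nat) (L : List (Nat × Nat)) :
    ∀ res, Shp N res → L.Nodup → (∀ p ∈ L, p.1 < N ∧ p.2 < N) →
      ∀ r c, r < N → c < N →
        gE (L.foldl (stepA m N) res) r c
          = if (r, c) ∈ L ∧ cA m N r c then gE res r c + 1 else gE res r c := by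
  induction L with
  | nil => intro res _ _ _ r c _ _; simp
  | cons p L ih =>
    intro res hsh hnd hb r c hr hc
    obtain ⟨hp1, hp2⟩ := hb p (List.mem_cons_self ..)
    have hbL : ∀ q ∈ L, q.1 < N ∧ q.2 < N := fun q hq => hb q (List.mem_cons_of_mem _ hq)
    obtain ⟨hpn, hnd'⟩ := List.nodup_cons.mp hnd
    rw [List.foldl_cons]
    by_cases hca : cA m N p.1 p.2
    · have hstep : stepA m N res p
          = res.set p.1 ((res.getD p.1 []).set p.2 ((res.getD p.1 []).getD p.2 0 + 1)) := by
        simp [stepA, hca]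
      rw [hstep, ih _ (shp_set hsh _ _ hp1) hnd' hbL r c hr hc]
      by_cases hpe : (r, c) = p
      · have hre : r = p.1 := by rw [← hpe]
        have hce : c = p.2 := by rw [← hpe]
        subst hre; subst hce
        rw [if_neg (by exact fun hm => hpn (by simpa using hm.1)),
          if_pos ⟨List.mem_cons_self .., hca⟩,
          gE_set hsh hp1 hp2 hr hc, if_pos ⟨rfl, rfl⟩]
        rfl
      · have hmem : (r, c) ∈ p :: L ↔ (r, c) ∈ L := by
          simp [List.mem_cons, hpe]
        rw [gE_set hsh hp1 hp2 hr hc,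
          if_neg (fun hh : r = p.1 ∧ c = p.2 => hpe (by cases p; simp_all))]
        simp only [hmem]
    · have hstep : stepA m N res p = res := by simp [stepA, hca]
      rw [hstep, ih _ hsh hnd' hbL r c hr hc]
      by_cases hmL : (r, c) ∈ L ∧ cA m N r c
      · rw [if_pos hmL, if_pos ⟨List.mem_cons_of_mem _ hmL.1, hmL.2⟩]
      · rw [if_neg hmL, if_neg ?_]
        rintro ⟨hm, hcrc⟩
        rcases List.mem_cons.mp hm with he | hm'
        · have hre : r = p.1 := by rw [← he]
          have hce : c = p.2 := by rw [← he]
          exact hca (by rw [← hre, ← hce]; exact hcrc)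
        · exact hmL ⟨hm', hcrc⟩

lemma shp_bump {N : Nat} {res : List (List Int)} (h : Shp N res) (a b : Int) :
    Shp N (pvBump (N : Int) res (a, b)) := by
  have hlen := h.1
  unfold pvBump
  split
  · next hg0 =>
    have hg : 0 ≤ a ∧ a < (N : Int) ∧ 0 ≤ b ∧ b < (N : Int) := hg0
    have ha : a.toNat < N := by omega
    have hb : 0 ≤ b := hg.2.2.1
    rw [PySem.List.pySetD_of_nonneg _ _ hg.1, PySem.List.pySetD_of_nonneg _ _ hb,
      PySem.List.pyGetD_eq_getElem _ _ hg.1 (by rw [h.1]; exact_mod_cast hg.2.1)]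
    have he : res[a.toNat]'(by omega) = res.getD a.toNat [] := by
      rw [List.getD_eq_getElem _ _ (by omega)]
    rw [he]
    exact shp_set h _ _ ha
  · exact h

lemma gE_bump {N : Nat} {res : List (List Int)} (h : Shp N res) (a b : Int) {r c : Nat}
    (hr : r < N) (hc : c < N) :
    gE (pvBump (N : Int) res (a, b)) r c
      = if a = (r : Int) ∧ b = (c : Int) then 1 else gE res r c := by
  have hlen := h.1
  unfold pvBump
  split
  · next hg0 =>
    have hg : 0 ≤ a ∧ a < (N : Int) ∧ 0 ≤ b ∧ b < (N : Int) := hg0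
    have ha : a.toNat < N := by omega
    have hbn : b.toNat < N := by omega
    rw [PySem.List.pySetD_of_nonneg _ _ hg.1, PySem.List.pySetD_of_nonneg _ _ hg.2.2.1,
      PySem.List.pyGetD_eq_getElem _ _ hg.1 (by rw [hlen]; exact_mod_cast hg.2.1)]
    have he : res[a.toNat]'(by omega) = res.getD a.toNat [] := by
      rw [List.getD_eq_getElem _ _ (by omega)]
    rw [he, gE_set h ha hbn hr hc]
    have hiff : (r = a.toNat ∧ c = b.toNat) ↔ (a = (r : Int) ∧ b = (c : Int)) := by
      constructor <;> rintro ⟨h1, h2⟩ <;> constructor <;> omega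
    simp only [hiff]
  · next hg =>
    have hne : ¬(a = (r : Int) ∧ b = (c : Int)) := by
      rintro ⟨rfl, rfl⟩
      exact hg ⟨by omega, by exact_mod_cast Nat.cast_lt.mpr hr, by omega,
        by exact_mod_cast Nat.cast_lt.mpr hc⟩
    rw [if_neg hne]

lemma ite_or4 {P Q R S : Prop} [Decidable P] [Decidable Q] [Decidable R] [Decidable S]
    (x y : Int) :
    (if S then x else if R then x else if Q then x else if P then x else y)
      = if P ∨ Q ∨ R ∨ S then x else y := by
  split_ifs <;> tauto

lemma gE_bump4 {N : Nat} {res : List (List Int)} (h : Shp N res)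
    {p : Nat × Nat} {r c : Nat} (hr : r < N) (hc : c < N) :
    gE ([((p.1 : Int) - 1, (p.2 : Int)), ((p.1 : Int) + 1, (p.2 : Int)),
         ((p.1 : Int), (p.2 : Int) - 1), ((p.1 : Int), (p.2 : Int) + 1)].foldl
          (pvBump (N : Int)) res) r c
      = if nb p.1 p.2 r c then 1 else gE res r c := by
  simp only [List.foldl_cons, List.foldl_nil]
  have s1 := shp_bump h ((p.1 : Int) - 1) (p.2 : Int)
  have s2 := shp_bump s1 ((p.1 : Int) + 1) (p.2 : Int)
  have s3 := shp_bump s2 (p.1 : Int) ((p.2 : Int) - 1)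
  rw [gE_bump s3 _ _ hr hc, gE_bump s2 _ _ hr hc, gE_bump s1 _ _ hr hc,
    gE_bump h _ _ hr hc]
  rw [ite_or4]
  simp only [nb, decide_eq_true_eq]

lemma entryB (m : List (List String)) (N : Nat) (L : List (Nat × Nat)) :
    ∀ res, Shp N res → ∀ r c, r < N → c < N →
      gE (L.foldl (stepB m N) res) r c
        = if L.any (fun q => decide (pvCell m q.1 q.2 = "P") && nb q.1 q.2 r c) then 1
          else gE res r c := by
  induction L with
  | nil => intro res _ r c _ _; simp
  | cons p L ih =>
    intro res hsh r c hr hc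
    rw [List.foldl_cons]
    have hshp : Shp N (stepB m N res p) := by
      unfold stepB
      split
      · exact shp_bump (shp_bump (shp_bump (shp_bump hsh _ _) _ _) _ _) _ _
      · exact hsh
    rw [ih _ hshp r c hr hc]
    simp only [List.any_cons]
    by_cases hany : L.any (fun q => decide (pvCell m q.1 q.2 = "P") && nb q.1 q.2 r c)
    · simp [hany]
    · simp only [hany, Bool.or_false]
      by_cases hpit : pvCell m p.1 p.2 = "P"
      · have hstep : stepB m N res p
            = [((p.1 : Int) - 1, (p.2 : Int)), ((p.1 : Int) + 1, (p.2 : Int)),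
               ((p.1 : Int), (p.2 : Int) - 1), ((p.1 : Int), (p.2 : Int) + 1)].foldl
                (pvBump (N : Int)) res := by
          simp [stepB, hpit]
        rw [hstep, gE_bump4 hsh hr hc]
        simp [hpit]
      · have hstep : stepB m N res p = res := by simp [stepB, hpit]
        rw [hstep]
        simp [hpit]

lemma cond_iff (m : List (List String)) (N : Nat) {r c : Nat} (hr : r < N) (hc : c < N) :
    cA m N r c = (pairs N).any (fun q => decide (pvCell m q.1 q.2 = "P") && nb q.1 q.2 r c) := by
  rcases hca : cA m N r c with _ | _
  · rcases hany : (pairs N).any (fun q => decide (pvCell m q.1 q.2 = "P") && nb q.1 q.2 r c) with _ | _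
    · rfl
    · exfalso
      rw [List.any_eq_true] at hany
      obtain ⟨q, hq, hcond⟩ := hany
      rw [Bool.and_eq_true, decide_eq_true_eq] at hcond
      obtain ⟨hpit, hnb⟩ := hcond
      obtain ⟨hq1, hq2⟩ := mem_pairs.mp hq
      simp only [nb, decide_eq_true_eq] at hnb
      simp only [cA, decide_eq_false_iff_not, not_or, not_and] at hca
      obtain ⟨n1, n2, n3, n4⟩ := hca
      rcases hnb with ⟨h1, h2⟩ | ⟨h1, h2⟩ | ⟨h1, h2⟩ | ⟨h1, h2⟩
      · -- pit at (r+1, c)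
        apply n2 (by omega)
        rw [show (r : Int) + 1 = (q.1 : Int) by omega, show (c : Int) = (q.2 : Int) by omega]
        exact hpit
      · -- pit at (r-1, c)
        apply n1 (by omega)
        rw [show (r : Int) - 1 = (q.1 : Int) by omega, show (c : Int) = (q.2 : Int) by omega]
        exact hpit
      · -- pit at (r, c+1)
        apply n4 (by omega)
        rw [show (r : Int) = (q.1 : Int) by omega, show (c : Int) + 1 = (q.2 : Int) by omega]
        exact hpit
      · -- pit at (r, c-1)
        apply n3 (by omega)
        rw [show (r : Int) = (q.1 : Int) by omega, show (c : Int) - 1 = (q.2 : Int) by omega]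
        exact hpit
  · symm
    simp only [cA, decide_eq_true_eq] at hca
    rw [List.any_eq_true]
    rcases hca with ⟨h0, hP⟩ | ⟨h1, hP⟩ | ⟨h0, hP⟩ | ⟨h1, hP⟩
    · refine ⟨(r - 1, c), mem_pairs.mpr ⟨(by omega : r - 1 < N), hc⟩, ?_⟩
      show (decide (pvCell m ((r - 1 : Nat) : Int) (c : Int) = "P") && nb (r - 1) c r c) = true
      rw [Bool.and_eq_true, decide_eq_true_eq]
      refine ⟨by rw [show ((r - 1 : Nat) : Int) = (r : Int) - 1 by omega]; exact hP, ?_⟩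
      simp only [nb, decide_eq_true_eq]
      right; left; exact ⟨by omega, by trivial⟩
    · refine ⟨(r + 1, c), mem_pairs.mpr ⟨(by omega : r + 1 < N), hc⟩, ?_⟩
      show (decide (pvCell m ((r + 1 : Nat) : Int) (c : Int) = "P") && nb (r + 1) c r c) = true
      rw [Bool.and_eq_true, decide_eq_true_eq]
      refine ⟨by rw [show ((r + 1 : Nat) : Int) = (r : Int) + 1 by omega]; exact hP, ?_⟩
      simp only [nb, decide_eq_true_eq]
      left; exact ⟨by omega, by trivial⟩
    · refine ⟨(r, c - 1), mem_pairs.mpr ⟨hr, (by omega : c - 1 < N)⟩, ?_⟩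
      show (decide (pvCell m (r : Int) ((c - 1 : Nat) : Int) = "P") && nb r (c - 1) r c) = true
      rw [Bool.and_eq_true, decide_eq_true_eq]
      refine ⟨by rw [show ((c - 1 : Nat) : Int) = (c : Int) - 1 by omega]; exact hP, ?_⟩
      simp only [nb, decide_eq_true_eq]
      right; right; right; exact ⟨by trivial, by omega⟩
    · refine ⟨(r, c + 1), mem_pairs.mpr ⟨hr, (by omega : c + 1 < N)⟩, ?_⟩
      show (decide (pvCell m (r : Int) ((c + 1 : Nat) : Int) = "P") && nb r (c + 1) r c) = true
      rw [Bool.and_eq_true, decide_eq_true_eq]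
      refine ⟨by rw [show ((c + 1 : Nat) : Int) = (c : Int) + 1 by omega]; exact hP, ?_⟩
      simp only [nb, decide_eq_true_eq]
      right; right; left; exact ⟨by trivial, by omega⟩

lemma shp_foldlA (m : List (List String)) (N : Nat) (L : List (Nat × Nat)) :
    ∀ res, Shp N res → (∀ p ∈ L, p.1 < N ∧ p.2 < N) → Shp N (L.foldl (stepA m N) res) := by
  induction L with
  | nil => intro res h _; exact h
  | cons p L ih =>
    intro res h hb
    rw [List.foldl_cons]
    refine ih _ ?_ (fun q hq => hb q (List.mem_cons_of_mem _ hq))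
    unfold stepA
    split
    · exact shp_set h _ _ (hb p (List.mem_cons_self ..)).1
    · exact h

lemma shp_foldlB (m : List (List String)) (N : Nat) (L : List (Nat × Nat)) :
    ∀ res, Shp N res → Shp N (L.foldl (stepB m N) res) := by
  induction L with
  | nil => intro res h; exact h
  | cons p L ih =>
    intro res h
    rw [List.foldl_cons]
    refine ih _ ?_
    unfold stepB
    split
    · exact shp_bump (shp_bump (shp_bump (shp_bump h _ _) _ _) _ _) _ _
    · exact h

lemma eq_of_shp_gE {N : Nat} {x y : List (List Int)} (hx : Shp N x) (hy : Shp N y)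
    (h : ∀ r c, r < N → c < N → gE x r c = gE y r c) : x = y := by
  apply List.ext_getElem (by rw [hx.1, hy.1])
  intro r h1 h2
  apply List.ext_getElem (by rw [hx.2 _ (List.getElem_mem h1), hy.2 _ (List.getElem_mem h2)])
  intro c hc1 hc2
  have hrN : r < N := by rw [← hx.1]; exact h1
  have hcN : c < N := by rw [← hx.2 _ (List.getElem_mem h1)]; exact hc1
  have := h r c hrN hcN
  unfold gE at this
  rwa [List.getD_eq_getElem _ _ h1, List.getD_eq_getElem _ _ hc1,
    List.getD_eq_getElem _ _ h2, List.getD_eq_getElem _ _ hc2] at this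

lemma stepA_apply (m : List (List String)) (N : Nat) (res : List (List Int)) (i k : Nat) :
    (if (0 ≤ (i : Int) - 1 ∧ pvCell m ((i : Int) - 1) (k : Int) = "P")
        ∨ ((i : Int) + 1 < (N : Int) ∧ pvCell m ((i : Int) + 1) (k : Int) = "P")
        ∨ (0 ≤ (k : Int) - 1 ∧ pvCell m (i : Int) ((k : Int) - 1) = "P")
        ∨ ((k : Int) + 1 < (N : Int) ∧ pvCell m (i : Int) ((k : Int) + 1) = "P") then
      PySem.List.pySetD res (i : Int)
        (PySem.List.pySetD (PySem.List.pyGetD res (i : Int) []) (k : Int)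
          (PySem.List.pyGetD (PySem.List.pyGetD res (i : Int) []) (k : Int) 0 + 1))
    else res) = stepA m N res (i, k) := by
  simp only [stepA, cA, PySem.List.pySetD_natCast, PySem.List.pyGetD_natCast,
    decide_eq_true_eq]

lemma stepB_apply (m : List (List String)) (N : Nat) (res : List (List Int)) (i k : Nat) :
    (if pvCell m (i : Int) (k : Int) = "P" then
      [((i : Int) - 1, (k : Int)), ((i : Int) + 1, (k : Int)),
       ((i : Int), (k : Int) - 1), ((i : Int), (k : Int) + 1)].foldl (pvBump (N : Int)) res
    else res) = stepB m N res (i, k) := by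
  simp only [stepB]

lemma Breeze_eq (m : List (List String)) :
    Breeze m = (pairs m.length).foldl (stepA m m.length)
      ((List.range m.length).map (fun _ => (List.range m.length).map (fun _ => (0 : Int)))) := by
  have hp : pairs m.length
      = (List.range m.length).flatMap (fun i => (List.range m.length).map (fun k => (i, k))) :=
    rfl
  rw [hp, List.foldl_flatMap]
  simp only [Breeze, PySem.List.len_eq, PySem.List.pyRange_zero_nat, List.foldl_map,
    List.map_map, Function.comp_def]
  congr 1
  funext res i
  congr 1
  funext res' k
  exact stepA_apply m m.length res' i k

lemma Breeze_alt_eq (m : List (List String)) :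
    Breeze_alt m = (pairs m.length).foldl (stepB m m.length)
      ((List.range m.length).map (fun _ => List.replicate m.length (0 : Int))) := by
  have hp : pairs m.length
      = (List.range m.length).flatMap (fun i => (List.range m.length).map (fun k => (i, k))) :=
    rfl
  rw [hp, List.foldl_flatMap]
  simp only [Breeze_alt, PySem.List.len_eq, PySem.List.pyRange_zero_nat, List.foldl_map,
    List.map_map, Function.comp_def, Int.toNat_natCast, stepB_apply m m.length]

lemma shp_initA (N : Nat) :
    Shp N ((List.range N).map (fun _ => (List.range N).map (fun _ => (0 : Int)))) := by
  refine ⟨by simp, ?_⟩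
  intro row hrow
  rw [List.mem_map] at hrow
  obtain ⟨_, _, rfl⟩ := hrow
  simp

lemma shp_initB (N : Nat) :
    Shp N ((List.range N).map (fun _ => List.replicate N (0 : Int))) := by
  refine ⟨by simp, ?_⟩
  intro row hrow
  rw [List.mem_map] at hrow
  obtain ⟨_, _, rfl⟩ := hrow
  simp

lemma gE_const_row {N : Nat} (row : List Int) {r c : Nat} (hr : r < N) (hrow : row.getD c 0 = 0) :
    gE ((List.range N).map (fun _ => row)) r c = 0 := by
  unfold gE
  rw [List.getD_eq_getElem ((List.range N).map (fun _ => row)) [] (by simpa using hr),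
    List.getElem_map]
  exact hrow

theorem Breeze_spec : Claim_equal_Breeze := by
  intro matrix _ _
  unfold Spec_Breeze
  rw [Breeze_eq, Breeze_alt_eq]
  set N := matrix.length with hN
  apply eq_of_shp_gE
    (shp_foldlA matrix N _ _ (shp_initA N) (fun p hp => mem_pairs.mp hp))
    (shp_foldlB matrix N _ _ (shp_initB N))
  intro r c hr hc
  rw [entryA matrix N _ _ (shp_initA N) (nodup_pairs N) (fun p hp => mem_pairs.mp hp) r c hr hc,
    entryB matrix N _ _ (shp_initB N) r c hr hc]
  have hmem : (r, c) ∈ pairs N := mem_pairs.mpr ⟨hr, hc⟩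
  have h0A : gE ((List.range N).map (fun _ => (List.range N).map (fun _ => (0 : Int)))) r c = 0 :=
    gE_const_row _ hr (by
      rcases Nat.lt_or_ge c N with h | h
      · rw [List.getD_eq_getElem _ _ (by simpa using h)]; simp
      · rw [List.getD_eq_default _ _ (by simpa using h)])
  have h0B : gE ((List.range N).map (fun _ => List.replicate N (0 : Int))) r c = 0 :=
    gE_const_row _ hr (by
      rcases Nat.lt_or_ge c N with h | h
      · rw [List.getD_eq_getElem _ _ (by simpa using h)]; simp
      · rw [List.getD_eq_default _ _ (by simpa using h)])
  rw [h0A, h0B]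
  by_cases hca : cA matrix N r c = true
  · rw [if_pos ⟨hmem, hca⟩, if_pos (by rw [← cond_iff matrix N hr hc]; exact hca)]
    norm_num
  · rw [if_neg (fun hh => hca hh.2), if_neg (by rw [← cond_iff matrix N hr hc]; exact hca)]
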